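-- pv_equiv track=rewrite | github.com/fsImageries/pyUtils | src/pyUtils/pyhelper.py | listsplit_gap
-- ===== SOURCE A (Python) =====
-- def listsplit_gap(li):
--     """
--     Split a list by the numeric gap between it's elements. Only works on interger lists.
--
--     Args:
--         li ([List]): List which should be splited.
--
--     Returns:
--         [List]: Splited list.
--     """
--     # Determine where the gaps are occurring
--     gap_loc = [idx + 1
--                for (idx, el), next_el in zip(enumerate(li[:-1]), li[1:])
--                if (next_el - el) > 1]
--     # Adding beginning and end of the list
--     gap_loc.insert(0, 0)
--     gap_loc.append(len(li))
--     # Create sublists where gaps occurs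
--     list_seq = [li[prev_gap:gap]
--                 for prev_gap, gap in zip(gap_loc[:-1], gap_loc[1:])]
--
--     return list_seq
-- ===== SOURCE B (Python) =====
-- def listsplit_gap(li):
--     """One-pass grouping: maintain the current run instead of computing gap
--     positions and slicing (simpler decomposition, same results)."""
--     if not li:
--         return [[]]
--     result = []
--     current = [li[0]]
--     for prev, el in zip(li, li[1:]):
--         if el - prev > 1:
--             result.append(current)
--             current = [el]
--         else:
--             current.append(el)
--     result.append(current)
--     return result
-- ===== Notes on version B (the rewrite author's own statement) =====
-- stated objective: simpler
-- what changed: B builds the groups directly in one pass, carrying the in-progress run and flushing it at each gap, instead of A's three phases of computing gap indices, padding them with 0 and len, and slicing between consecutive indices.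
import Mathlib
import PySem

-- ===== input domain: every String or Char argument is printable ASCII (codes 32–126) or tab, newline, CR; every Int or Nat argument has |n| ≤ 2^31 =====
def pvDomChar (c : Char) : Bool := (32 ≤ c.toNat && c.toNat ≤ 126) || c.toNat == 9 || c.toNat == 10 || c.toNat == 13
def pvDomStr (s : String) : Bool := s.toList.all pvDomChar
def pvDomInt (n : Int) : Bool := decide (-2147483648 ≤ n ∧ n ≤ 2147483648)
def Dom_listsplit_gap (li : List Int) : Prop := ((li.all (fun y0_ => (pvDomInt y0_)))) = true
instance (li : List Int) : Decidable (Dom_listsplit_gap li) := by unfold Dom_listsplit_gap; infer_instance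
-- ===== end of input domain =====

-- B replaces A's three phases (gap indices, padding with 0/len, slicing between
-- consecutive indices) by a single pass that carries the in-progress run; same results.

-- ===== PORT A =====
def listsplit_gap (li : List Int) : List (List Int) :=
  -- gap_loc = [idx+1 for (idx, el), next_el in zip(enumerate(li[:-1]), li[1:]) if next_el - el > 1]
  let gapLoc0 : List Int :=
    ((PySem.List.enumerate (PySem.List.slice li none (some (-1))) 0).zip
        (PySem.List.slice li (some 1) none)).filterMap
      (fun p => if p.2 - p.1.2 > 1 then some (p.1.1 + 1) else none)
  -- gap_loc.insert(0, 0); gap_loc.append(len(li))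
  let gapLoc : List Int := PySem.List.insert gapLoc0 0 0 ++ [(li.length : Int)]
  -- [li[prev_gap:gap] for prev_gap, gap in zip(gap_loc[:-1], gap_loc[1:])]
  ((PySem.List.slice gapLoc none (some (-1))).zip
      (PySem.List.slice gapLoc (some 1) none)).map
    (fun p => PySem.List.slice li (some p.1) (some p.2))

-- ===== PORT B =====
def listsplit_gap_alt (li : List Int) : List (List Int) :=
  match li with
  | [] => [[]]
  | x :: _ =>
    let st := (li.zip (PySem.List.slice li (some 1) none)).foldl
      (fun (st : List (List Int) × List Int) p =>
        if p.2 - p.1 > 1 then (st.1 ++ [st.2], [p.2]) else (st.1, st.2 ++ [p.2]))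
      ([], [x])
    st.1 ++ [st.2]

-- ===== PRECONDITION & SPEC =====
def Spec_listsplit_gap (li : List Int) (out : List (List Int)) : Prop := out = listsplit_gap_alt li
instance (li : List Int) (out : List (List Int)) : Decidable (Spec_listsplit_gap li out) := by unfold Spec_listsplit_gap; infer_instance

-- ===== CLAIM (what is proved, stated in full; the proofs are below) =====
def Claim_equal_listsplit_gap : Prop := ∀ (li : List Int), Dom_listsplit_gap li → Spec_listsplit_gap li (listsplit_gap li)

-- ===== LEMMAS AND PROOFS =====

-- canonical recursive grouping, the middle point of the proof
def chunk (x : Int) : List Int → List (List Int)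
  | [] => [[x]]
  | y :: ys =>
    if y - x > 1 then [x] :: chunk y ys
    else
      match chunk y ys with
      | [] => [[x]]
      | g :: gs => (x :: g) :: gs

theorem chunk_ne_nil (x : Int) (t : List Int) : chunk x t ≠ [] := by
  cases t with
  | nil => simp [chunk]
  | cons y ys =>
    simp only [chunk]
    split
    · simp
    · split <;> simp

theorem chunk_cons_eq (x : Int) (t : List Int) :
    chunk x t = (chunk x t).headI :: (chunk x t).tail :=
  (List.cons_head!_tail (by simpa using chunk_ne_nil x t)).symm

-- Nat-valued gap indices, recursively
def gapsN (k : Nat) : List Int → List Nat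
  | x :: y :: ys => if y - x > 1 then (k+1) :: gapsN (k+1) (y :: ys) else gapsN (k+1) (y :: ys)
  | _ => []

theorem gapsN_shift (l : List Int) : ∀ k, gapsN (k+1) l = (gapsN k l).map (· + 1) := by
  induction l with
  | nil => intro k; simp [gapsN]
  | cons x t ih =>
    intro k
    cases t with
    | nil => simp [gapsN]
    | cons y ys =>
      simp only [gapsN, ih]
      split <;> simp

-- A's comprehension computes gapsN (cast to Int)
theorem gapIdx_eq_gapsN (l : List Int) : ∀ s : Nat,
    ((PySem.List.enumerate l.dropLast (s : Int)).zip l.tail).filterMap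
      (fun p => if p.2 - p.1.2 > 1 then some (p.1.1 + 1) else none)
    = (gapsN s l).map (fun n : Nat => (n : Int)) := by
  induction l with
  | nil => intro s; simp [gapsN]
  | cons x t ih =>
    intro s
    cases t with
    | nil => simp [gapsN]
    | cons y ys =>
      rw [List.dropLast_cons₂]
      simp only [PySem.List.enumerate_cons, List.tail_cons, List.zip_cons_cons,
        List.filterMap_cons]
      have hc : ((s : Int) + 1) = ((s + 1 : Nat) : Int) := by push_cast; ring
      have h := ih (s + 1)
      simp only [List.tail_cons] at h
      rw [hc, h]
      by_cases hgap : y - x > 1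
      · simp [gapsN, hgap]
      · simp [gapsN, hgap]

-- slicing between consecutive indices (A's final comprehension, over Nat indices)
def sliceMap (li : List Int) (gl : List Nat) : List (List Int) :=
  (gl.dropLast.zip gl.tail).map (fun p => (li.drop p.1).take (p.2 - p.1))

theorem sliceMap_cons_shift (x : Int) (t : List Int) (gl : List Nat) :
    sliceMap (x :: t) (gl.map (· + 1)) = sliceMap t gl := by
  unfold sliceMap
  rw [← List.map_tail, ← List.map_dropLast, List.zip_map, List.map_map]
  apply List.map_congr_left
  intro p _
  simp [Prod.map]

theorem sliceMap_cons_cons (li : List Int) (a b : Nat) (r : List Nat) :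
    sliceMap li (a :: b :: r) = (li.drop a).take (b - a) :: sliceMap li (b :: r) := by
  simp [sliceMap]

-- main A-side characterisation: slicing at the padded gap indices is chunk
theorem sliceMap_gaps (t : List Int) : ∀ x : Int,
    sliceMap (x :: t) (0 :: gapsN 0 (x :: t) ++ [t.length + 1]) = chunk x t := by
  induction t with
  | nil => intro x; simp [gapsN, sliceMap, chunk]
  | cons y ys ih =>
    intro x
    have hshift : gapsN 1 (y :: ys) = (gapsN 0 (y :: ys)).map (· + 1) := gapsN_shift _ 0
    by_cases hgap : y - x > 1
    · have hrw : (0 : Nat) :: gapsN 0 (x :: y :: ys) ++ [(y :: ys).length + 1]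
          = 0 :: ((0 :: gapsN 0 (y :: ys) ++ [(y :: ys).length]).map (· + 1)) := by
        simp [gapsN, hgap, hshift]
      rw [hrw]
      rcases hmatch : (0 :: gapsN 0 (y :: ys) ++ [(y :: ys).length]).map (· + 1) with _ | ⟨m, M⟩
      · simp at hmatch
      · rw [sliceMap_cons_cons]
        have hm : m = 1 := by
          have := congrArg List.head? hmatch; simpa using this.symm
        rw [← hmatch, sliceMap_cons_shift]
        have hys : (y :: ys).length = ys.length + 1 := by simp
        rw [hys] at *
        rw [ih y]
        simp [chunk, hgap, hm]
    · have hG : (0 : Nat) :: gapsN 0 (x :: y :: ys) ++ [(y :: ys).length + 1]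
          = 0 :: ((gapsN 0 (y :: ys) ++ [(y :: ys).length]).map (· + 1)) := by
        simp [gapsN, hgap, hshift]
      rcases hG0 : gapsN 0 (y :: ys) ++ [(y :: ys).length] with _ | ⟨c, R⟩
      · simp at hG0
      · have hIH := ih y
        rw [show (0:Nat) :: gapsN 0 (y :: ys) ++ [ys.length + 1] = 0 :: c :: R by
              simpa using congrArg (0 :: ·) hG0] at hIH
        rw [sliceMap_cons_cons] at hIH
        simp only [Nat.sub_zero, List.drop_zero] at hIH
        rw [hG, hG0]
        simp only [List.map_cons]
        rw [sliceMap_cons_cons]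
        have hmap : (c + 1) :: R.map (· + 1) = (c :: R).map (· + 1) := by simp
        rw [hmap, sliceMap_cons_shift]
        have htake : ((x :: y :: ys).drop 0).take (c + 1 - 0) = x :: ((y :: ys).take c) := by
          simp
        rw [htake]
        cases hc : chunk y ys with
        | nil => exact absurd hc (chunk_ne_nil y ys)
        | cons g gs =>
          rw [hc] at hIH
          have h1 : (y :: ys).take c = g := by
            have := congrArg List.head? hIH; simpa using this
          have h2 : sliceMap (y :: ys) (c :: R) = gs := by
            have := congrArg List.tail hIH; simpa using this
          rw [h1, h2]
          simp [chunk, hgap, hc]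

-- A equals chunk
theorem A_eq_chunk (x : Int) (t : List Int) : listsplit_gap (x :: t) = chunk x t := by
  simp only [listsplit_gap, PySem.List.slice_to_neg_one, PySem.List.slice_from_one]
  have hg := gapIdx_eq_gapsN (x :: t) 0
  simp only [Nat.cast_zero] at hg
  rw [hg, PySem.List.insert_zero]
  have hcast : (0 : Int) :: (gapsN 0 (x :: t)).map (fun n : Nat => (n : Int)) ++ [((x :: t).length : Int)]
      = (0 :: gapsN 0 (x :: t) ++ [t.length + 1]).map (fun n : Nat => (n : Int)) := by
    simp
  rw [hcast]
  rw [← List.map_dropLast, ← List.map_tail, List.zip_map, List.map_map]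
  have hpt : ∀ p ∈ ((0 :: gapsN 0 (x :: t) ++ [t.length + 1]).dropLast.zip
        (0 :: gapsN 0 (x :: t) ++ [t.length + 1]).tail),
      ((fun p : Int × Int => PySem.List.slice (x :: t) (some p.1) (some p.2)) ∘
        Prod.map (fun n : Nat => (n : Int)) (fun n : Nat => (n : Int))) p
      = (fun p : Nat × Nat => (((x :: t).drop p.1).take (p.2 - p.1))) p := by
    intro p _
    simp [Prod.map, PySem.List.slice_natCast]
  rw [List.map_congr_left hpt]
  exact sliceMap_gaps t x

-- B-side: the fold with the carried run equals chunk
theorem fold_chunk (xs : List Int) : ∀ (x : Int) (acc : List (List Int)) (pre : List Int),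
    (((x :: xs).zip xs).foldl
        (fun (st : List (List Int) × List Int) p =>
          if p.2 - p.1 > 1 then (st.1 ++ [st.2], [p.2]) else (st.1, st.2 ++ [p.2]))
        (acc, pre ++ [x])).1
      ++ [(((x :: xs).zip xs).foldl
        (fun (st : List (List Int) × List Int) p =>
          if p.2 - p.1 > 1 then (st.1 ++ [st.2], [p.2]) else (st.1, st.2 ++ [p.2]))
        (acc, pre ++ [x])).2]
    = acc ++ ((pre ++ (chunk x xs).headI) :: (chunk x xs).tail) := by
  induction xs with
  | nil => intro x acc pre; simp [chunk]
  | cons y ys ih =>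
    intro x acc pre
    simp only [List.zip_cons_cons, List.foldl_cons]
    by_cases hgap : y - x > 1
    · simp only [if_pos hgap]
      have h := ih y (acc ++ [pre ++ [x]]) []
      simp only [List.nil_append] at h
      rw [h, ← chunk_cons_eq y ys]
      simp [chunk, hgap]
    · simp only [if_neg hgap]
      have h := ih y acc (pre ++ [x])
      rw [h]
      simp only [chunk, if_neg hgap]
      cases hc : chunk y ys with
      | nil => exact absurd hc (chunk_ne_nil y ys)
      | cons g gs => simp

theorem B_eq_chunk (x : Int) (t : List Int) : listsplit_gap_alt (x :: t) = chunk x t := by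
  simp only [listsplit_gap_alt]
  rw [PySem.List.slice_from_one]
  simp only [List.tail_cons]
  have h := fold_chunk t x [] []
  simp only [List.nil_append] at h
  rw [h]
  exact (chunk_cons_eq x t).symm

-- ===== VERDICT (by name: the statement is the Claim_ definition above) =====
theorem listsplit_gap_spec : Claim_equal_listsplit_gap := by
  intro li _
  unfold Spec_listsplit_gap
  cases li with
  | nil => decide
  | cons x t => rw [A_eq_chunk, B_eq_chunk]
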